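-- pv_equiv track=rewrite | github.com/Nischal5123/Querying-With-Conflicts | src/old/coi-algorithms-basic-scalability.py | _boundary_supported
-- ===== SOURCE A (Python) =====
-- from typing import List, Dict, Tuple, Optional, Any, Iterable
--
-- def _boundary_supported(idx_map: Dict[Any, int], R: List[int], Gi: List[Any], Gj: List[Any]) -> bool:
--     want = 0
--     for v in Gj:
--         want |= (1 << idx_map[v])
--     for u in Gi:
--         if (R[idx_map[u]] & want) != want:
--             return False
--     return True
-- ===== SOURCE B (Python) =====
-- from typing import List, Dict, Any
--
--
-- def _boundary_supported(idx_map: Dict[Any, int], R: List[int], Gi: List[Any], Gj: List[Any]) -> bool: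
--     return all((R[idx_map[u]] >> idx_map[v]) & 1 for u in Gi for v in Gj)
-- ===== Notes on version B (the rewrite author's own statement) =====
-- stated objective: simpler
-- what changed: B builds no OR-bitmask at all: one flat all() over (u, v) pairs tests each Gj bit individually in each Gi row, replacing A's mask-construction loop plus per-row mask comparison.
import Mathlib
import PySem

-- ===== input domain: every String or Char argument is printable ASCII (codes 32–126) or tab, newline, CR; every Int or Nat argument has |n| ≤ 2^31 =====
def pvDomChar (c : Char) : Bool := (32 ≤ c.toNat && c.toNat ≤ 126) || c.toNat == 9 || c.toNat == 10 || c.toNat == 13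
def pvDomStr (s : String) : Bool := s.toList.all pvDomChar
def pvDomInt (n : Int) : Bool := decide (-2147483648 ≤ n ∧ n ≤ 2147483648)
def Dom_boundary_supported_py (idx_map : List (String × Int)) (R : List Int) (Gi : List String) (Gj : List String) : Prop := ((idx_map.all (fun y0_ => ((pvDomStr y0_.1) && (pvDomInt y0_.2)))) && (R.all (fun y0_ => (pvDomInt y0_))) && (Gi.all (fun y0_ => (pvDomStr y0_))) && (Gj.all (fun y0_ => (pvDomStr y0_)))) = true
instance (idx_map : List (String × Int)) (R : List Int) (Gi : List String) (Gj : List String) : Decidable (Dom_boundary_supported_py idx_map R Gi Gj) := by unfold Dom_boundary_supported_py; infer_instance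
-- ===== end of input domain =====

-- ===== PORT A =====
-- B drops A's OR-bitmask entirely: it gathers the Gi rows once and checks bit-by-bit
-- (for each Gj vertex, that single bit in every row) with transposed loops; equal-cost alternative.

-- helper of A: the `want` mask loop  (want |= 1 << idx_map[v])
def bspWant (idx_map : List (String × Int)) (Gj : List String) : Int :=
  Gj.foldl (fun w v => PySem.Int.bor w ((1 : Int) <<< ((List.lookup v idx_map).getD 0).toNat)) 0

-- helper of A: the early-exit row-check loop (returns False at the first failing row)
def bspCheck (idx_map : List (String × Int)) (R : List Int) (want : Int) : List String → Bool
  | [] => true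
  | u :: rest =>
    if PySem.Int.band (PySem.List.pyGetD R ((List.lookup u idx_map).getD 0) 0) want ≠ want then
      false
    else
      bspCheck idx_map R want rest

def boundary_supported_py (idx_map : List (String × Int)) (R : List Int) (Gi : List String) (Gj : List String) : Bool :=
  bspCheck idx_map R (bspWant idx_map Gj) Gi

-- ===== PORT B =====
-- Source B: all((R[idx_map[u]] >> idx_map[v]) & 1 for u in Gi for v in Gj)  (a flat lazy generator = nested alls)
def boundary_supported_py_alt (idx_map : List (String × Int)) (R : List Int) (Gi : List String) (Gj : List String) : Bool :=
  Gi.all (fun u => Gj.all (fun v =>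
    PySem.Int.band ((PySem.List.pyGetD R ((List.lookup u idx_map).getD 0) 0) >>> ((List.lookup v idx_map).getD 0).toNat) 1 != 0))

-- ===== PRECONDITION & SPEC =====
-- a Gj vertex usable for the shift: present in idx_map, mapped to a nonnegative index
def pvGoodJ (idx_map : List (String × Int)) (v : String) : Prop :=
  (List.lookup v idx_map).isSome = true ∧ 0 ≤ (List.lookup v idx_map).getD 0

-- a Gi vertex usable as a row index: present in idx_map, mapped inside R (Python wraparound allowed)
def pvGoodI (idx_map : List (String × Int)) (R : List Int) (u : String) : Prop :=
  (List.lookup u idx_map).isSome = true ∧ PySem.Raise.InRange R.length ((List.lookup u idx_map).getD 0)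

-- the row of u contains every Gj bit (stated declaratively via testBit)
def pvRowOK (idx_map : List (String × Int)) (R : List Int) (Gj : List String) (u : String) : Prop :=
  ∀ v ∈ Gj, (PySem.List.pyGetD R ((List.lookup u idx_map).getD 0) 0).testBit ((List.lookup v idx_map).getD 0).toNat = true

-- Pre_ excludes exactly the inputs on which Python A raises: a Gj vertex missing from idx_map or
-- mapped negatively (KeyError / ValueError on 1 << negative), or a bad Gi vertex that A's scan
-- actually reaches, i.e. one that no earlier failing row hides behind the early exit (B raises
-- only on a subset of these inputs, so both Pythons return everywhere inside Pre_).
def Pre_boundary_supported_py (idx_map : List (String × Int)) (R : List Int) (Gi : List String) (Gj : List String) : Prop :=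
  (∀ v ∈ Gj, pvGoodJ idx_map v) ∧
  (∀ i < Gi.length, (∀ j < i, pvRowOK idx_map R Gj (Gi.getD j "")) → pvGoodI idx_map R (Gi.getD i ""))
instance (idx_map : List (String × Int)) (R : List Int) (Gi : List String) (Gj : List String) : Decidable (Pre_boundary_supported_py idx_map R Gi Gj) := by unfold Pre_boundary_supported_py pvGoodJ pvGoodI pvRowOK; infer_instance

def pvWitness_boundary_supported_py : (List (String × Int)) × List Int × List String × List String :=
  ([("a", 0), ("b", 1)], [3, 1], ["a", "b"], ["a"])

def Spec_boundary_supported_py (idx_map : List (String × Int)) (R : List Int) (Gi : List String) (Gj : List String) (out : Bool) : Prop := out = boundary_supported_py_alt idx_map R Gi Gj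
instance (idx_map : List (String × Int)) (R : List Int) (Gi : List String) (Gj : List String) (out : Bool) : Decidable (Spec_boundary_supported_py idx_map R Gi Gj out) := by unfold Spec_boundary_supported_py; infer_instance

-- ===== CLAIM =====
def Claim_equal_boundary_supported_py : Prop := ∀ (idx_map : List (String × Int)) (R : List Int) (Gi : List String) (Gj : List String), Dom_boundary_supported_py idx_map R Gi Gj → Pre_boundary_supported_py idx_map R Gi Gj → Spec_boundary_supported_py idx_map R Gi Gj (boundary_supported_py idx_map R Gi Gj)

-- ===== LEMMAS AND PROOFS =====

-- (m &&& n) and (m.ldiff n) partition the bits of m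
lemma pv_and_add_ldiff (m : Nat) : ∀ n : Nat, (m &&& n) + m.ldiff n = m := by
  induction m using Nat.strong_induction_on with
  | _ m ih =>
    intro n
    rcases Nat.eq_zero_or_pos m with hm | hm
    · subst hm; simp [Nat.ldiff]
    · have hdiv : m / 2 < m := Nat.div_lt_self hm (by omega)
      have ihd := ih (m / 2) hdiv (n / 2)
      have h1 : (m &&& n) / 2 = m / 2 &&& n / 2 := Nat.and_div_two
      have h2 : m.ldiff n / 2 = (m / 2).ldiff (n / 2) := by
        simpa only [Nat.pow_one] using
          Nat.bitwise_div_two_pow (f := fun a b => a && !b) (x := m) (y := n) (n := 1)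
      have q1 := congrArg (fun b => b = true) (Nat.testBit_and m n 0)
      have q2 := congrArg (fun b => b = true) (Nat.testBit_ldiff m n 0)
      simp only [Nat.testBit_zero, Bool.and_eq_true, Bool.not_eq_true',
        decide_eq_true_eq, decide_eq_false_iff_not, eq_iff_iff] at q1 q2
      rcases Nat.mod_two_eq_zero_or_one m with h | h <;>
        rcases Nat.mod_two_eq_zero_or_one n with h' | h'
      · have b1 : (m &&& n) % 2 ≠ 1 := fun hh => by have := (q1.mp hh).1; omega
        have b2 : m.ldiff n % 2 ≠ 1 := fun hh => by have := (q2.mp hh).1; omega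
        omega
      · have b1 : (m &&& n) % 2 ≠ 1 := fun hh => by have := (q1.mp hh).1; omega
        have b2 : m.ldiff n % 2 ≠ 1 := fun hh => by have := (q2.mp hh).1; omega
        omega
      · have b1 : (m &&& n) % 2 ≠ 1 := fun hh => by have := (q1.mp hh).2; omega
        have b2 : m.ldiff n % 2 = 1 := q2.mpr ⟨h, by omega⟩
        omega
      · have b1 : (m &&& n) % 2 = 1 := q1.mpr ⟨h, h'⟩
        have b2 : m.ldiff n % 2 ≠ 1 := fun hh => by have := (q2.mp hh).2; omega
        omega

lemma pv_sub_and_eq_ldiff (m n : Nat) : m - (m &&& n) = m.ldiff n := by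
  have := pv_and_add_ldiff m n
  omega

-- PySem's Python-exact band is Mathlib's Int.land
lemma pv_band_eq_land (a b : Int) : PySem.Int.band a b = Int.land a b := by
  unfold PySem.Int.band
  cases a with
  | ofNat m =>
    cases b with
    | ofNat n => simp [Int.land]
    | negSucc n =>
      have h : (-(Int.negSucc n) - 1).toNat = n := by
        simp [Int.negSucc_eq]
      simp only [Int.land]
      rw [if_pos (by exact Int.natCast_nonneg m), if_neg (by omega), h]
      show ((m - (m &&& n) : Nat) : Int) = _
      rw [pv_sub_and_eq_ldiff]
  | negSucc m =>
    cases b with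
    | ofNat n =>
      have h : (-(Int.negSucc m) - 1).toNat = m := by
        simp [Int.negSucc_eq]
      simp only [Int.land]
      rw [if_neg (by omega), if_pos (by exact Int.natCast_nonneg n), h]
      show ((n - (n &&& m) : Nat) : Int) = _
      rw [pv_sub_and_eq_ldiff]
    | negSucc n =>
      have hm : (-(Int.negSucc m) - 1).toNat = m := by simp [Int.negSucc_eq]
      have hn : (-(Int.negSucc n) - 1).toNat = n := by simp [Int.negSucc_eq]
      simp only [Int.land]
      rw [if_neg (by omega), if_neg (by omega), hm, hn]
      simp [Int.negSucc_eq]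
      omega

-- extensionality of Int by bits
lemma pv_int_eq_of_testBit_eq (a b : Int) (h : ∀ k, a.testBit k = b.testBit k) : a = b := by
  cases a with
  | ofNat m =>
    cases b with
    | ofNat n =>
      have : m = n := Nat.eq_of_testBit_eq (fun k => h k)
      simp [this]
    | negSucc n =>
      exfalso
      have hk := h (m + n)
      have h1 : Nat.testBit m (m + n) = false :=
        Nat.testBit_lt_two_pow (lt_of_lt_of_le Nat.lt_two_pow_self
          (Nat.pow_le_pow_right (by omega) (by omega)))
      have h2 : Nat.testBit n (m + n) = false :=
        Nat.testBit_lt_two_pow (lt_of_lt_of_le Nat.lt_two_pow_self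
          (Nat.pow_le_pow_right (by omega) (by omega)))
      simp [Int.testBit, h1, h2] at hk
  | negSucc m =>
    cases b with
    | ofNat n =>
      exfalso
      have hk := h (m + n)
      have h1 : Nat.testBit m (m + n) = false :=
        Nat.testBit_lt_two_pow (lt_of_lt_of_le Nat.lt_two_pow_self
          (Nat.pow_le_pow_right (by omega) (by omega)))
      have h2 : Nat.testBit n (m + n) = false :=
        Nat.testBit_lt_two_pow (lt_of_lt_of_le Nat.lt_two_pow_self
          (Nat.pow_le_pow_right (by omega) (by omega)))
      simp [Int.testBit, h1, h2] at hk
    | negSucc n =>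
      have : m = n := Nat.eq_of_testBit_eq (fun k => by
        have := h k
        simpa [Int.testBit] using this)
      simp [this]

-- x & w == w says exactly: every bit of w is a bit of x
lemma pv_land_eq_right_iff (x w : Int) :
    Int.land x w = w ↔ ∀ k, w.testBit k = true → x.testBit k = true := by
  constructor
  · intro h k hk
    have := congrArg (fun z => z.testBit k) h
    simp only [Int.testBit_land, hk, Bool.and_true] at this
    exact this
  · intro h
    apply pv_int_eq_of_testBit_eq
    intro k
    rw [Int.testBit_land]
    cases hw : w.testBit k with
    | false => simp
    | true => simp [h k hw]

-- arithmetic shift right commutes with testBit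
lemma pv_testBit_shiftRight (x : Int) (i j : Nat) :
    (x >>> i).testBit j = x.testBit (i + j) := by
  cases x with
  | ofNat m =>
    show (Int.ofNat (m >>> i)).testBit j = (Int.ofNat m).testBit (i + j)
    simp [Int.testBit, Nat.testBit_shiftRight]
  | negSucc m =>
    show (Int.negSucc (m >>> i)).testBit j = (Int.negSucc m).testBit (i + j)
    simp [Int.testBit, Nat.testBit_shiftRight]

-- Python's truthiness test `x & 1` is testBit 0
lemma pv_band_one_ne_zero (x : Int) :
    (PySem.Int.band x 1 != 0) = x.testBit 0 := by
  rw [PySem.Int.band_one, PySem.Int.mod_eq_emod_of_pos (by norm_num)]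
  cases x with
  | ofNat m =>
    have hc : ((m : Int)) % 2 = ((m % 2 : Nat) : Int) := by
      rw [Int.natCast_mod]; norm_num
    show ((m : Int) % 2 != 0) = m.testBit 0
    rw [hc, Nat.testBit_zero]
    rcases Nat.mod_two_eq_zero_or_one m with h | h <;> simp [h]
  | negSucc m =>
    have hc : (Int.negSucc m) % 2 = 1 - ((m % 2 : Nat) : Int) := by
      have : (Int.negSucc m) = -(m : Int) - 1 := by simp [Int.negSucc_eq]; ring
      rw [this, Int.natCast_mod]
      omega
    show ((Int.negSucc m) % 2 != 0) = !m.testBit 0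
    rw [hc, Nat.testBit_zero]
    rcases Nat.mod_two_eq_zero_or_one m with h | h <;> simp [h]
  
-- A's `want` mask is a natural number: the fold over Nat masks, cast to Int
def pvNatWant (idx_map : List (String × Int)) (Gj : List String) : Nat :=
  Gj.foldl (fun w v => w ||| (1 <<< ((List.lookup v idx_map).getD 0).toNat)) 0

lemma pv_want_eq_natCast (idx_map : List (String × Int)) (Gj : List String) :
    bspWant idx_map Gj = ((pvNatWant idx_map Gj : Nat) : Int) := by
  unfold bspWant pvNatWant
  suffices h : ∀ (L : List String) (a : Nat),
      L.foldl (fun w v => PySem.Int.bor w ((1 : Int) <<< ((List.lookup v idx_map).getD 0).toNat)) ((a : Nat) : Int)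
        = ((L.foldl (fun w v => w ||| (1 <<< ((List.lookup v idx_map).getD 0).toNat)) a : Nat) : Int) by
    simpa using h Gj 0
  intro L
  induction L with
  | nil => intro a; rfl
  | cons v rest ih =>
    intro a
    simp only [List.foldl_cons]
    have hsh : ((1 : Int) <<< ((List.lookup v idx_map).getD 0).toNat)
        = (((1 <<< ((List.lookup v idx_map).getD 0).toNat : Nat)) : Int) := rfl
    rw [hsh, PySem.Int.bor_natCast, ih]

-- which bits the Nat mask has: exactly the Gj indices
lemma pv_natWant_testBit (idx_map : List (String × Int)) (Gj : List String) (k : Nat) :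
    (pvNatWant idx_map Gj).testBit k
      = Gj.any (fun v => decide (((List.lookup v idx_map).getD 0).toNat = k)) := by
  unfold pvNatWant
  suffices h : ∀ (L : List String) (a : Nat),
      (L.foldl (fun w v => w ||| (1 <<< ((List.lookup v idx_map).getD 0).toNat)) a).testBit k
        = (a.testBit k || L.any (fun v => decide (((List.lookup v idx_map).getD 0).toNat = k))) by
    simpa using h Gj 0
  intro L
  induction L with
  | nil => intro a; simp
  | cons v rest ih =>
    intro a
    simp only [List.foldl_cons, List.any_cons]
    rw [ih, Nat.testBit_or, Nat.one_shiftLeft, Nat.testBit_two_pow, Bool.or_assoc]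

-- A's early-exit loop, as a universally-quantified statement
lemma pv_check_iff (idx_map : List (String × Int)) (R : List Int) (w : Int) (L : List String) :
    bspCheck idx_map R w L = true
      ↔ ∀ u ∈ L, PySem.Int.band (PySem.List.pyGetD R ((List.lookup u idx_map).getD 0) 0) w = w := by
  induction L with
  | nil => simp [bspCheck]
  | cons u rest ih =>
    simp only [bspCheck]
    by_cases h : PySem.Int.band (PySem.List.pyGetD R ((List.lookup u idx_map).getD 0) 0) w = w
    · rw [if_neg (by simp [h]), ih]
      simp only [List.mem_cons]
      constructor
      · rintro hr u' (rfl | hu')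
        · exact h
        · exact hr u' hu'
      · intro hr u' hu'
        exact hr u' (Or.inr hu')
    · rw [if_pos (by simp [h])]
      exact ⟨fun hf => (Bool.false_ne_true hf).elim,
             fun hall => absurd (hall u (by simp)) h⟩

-- one row passes A's mask test iff it has every Gj bit
lemma pv_row_mask_iff (idx_map : List (String × Int)) (Gj : List String) (row : Int) :
    PySem.Int.band row (bspWant idx_map Gj) = bspWant idx_map Gj
      ↔ ∀ v ∈ Gj, row.testBit ((List.lookup v idx_map).getD 0).toNat = true := by
  rw [pv_band_eq_land, pv_land_eq_right_iff, pv_want_eq_natCast]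
  constructor
  · intro h v hv
    apply h
    show (pvNatWant idx_map Gj).testBit _ = true
    rw [pv_natWant_testBit]
    exact List.any_eq_true.mpr ⟨v, hv, by simp⟩
  · intro h k hk
    have hk' : (pvNatWant idx_map Gj).testBit k = true := hk
    rw [pv_natWant_testBit] at hk'
    obtain ⟨v, hv, hvk⟩ := List.any_eq_true.mp hk'
    have : ((List.lookup v idx_map).getD 0).toNat = k := of_decide_eq_true hvk
    exact this ▸ h v hv

-- ===== VERDICT (by name: the statement is the Claim_ definition above) =====
theorem boundary_supported_py_spec : Claim_equal_boundary_supported_py := by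
  intro idx_map R Gi Gj _ _
  unfold Spec_boundary_supported_py
  unfold boundary_supported_py boundary_supported_py_alt
  rw [Bool.eq_iff_iff, pv_check_iff]
  simp only [List.all_eq_true]
  constructor
  · intro h u hu v hv
    have := (pv_row_mask_iff idx_map Gj _).mp (h u hu) v hv
    rw [pv_band_one_ne_zero, pv_testBit_shiftRight, Nat.add_zero]
    exact this
  · intro h u hu
    rw [pv_row_mask_iff]
    intro v hv
    have := h u hu v hv
    rwa [pv_band_one_ne_zero, pv_testBit_shiftRight, Nat.add_zero] at this
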